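-- pv_equiv track=rewrite | github.com/DavidAGInnovation/Coding_tests | Python tests/test1.py | validate_string_test1
-- ===== SOURCE A (Python) =====
-- def validate_string_test1(s: str) -> bool:
--     """
--     Checks if a passed-in string is valid based on several criteria:
--     1. At least 6 characters long.
--     2. At least 2 but no more than 3 numbers (digits).
--     3. At least 1 non-numerical character between each number.
--     """
--     # 1. Length check
--     if len(s) < 6:
--         return False
--
--     # Find all digits and their indices
--     digit_indices = []
--     for i, char in enumerate(s):
--         if char.isdigit():
--             digit_indices.append(i)
--
--     num_digits = len(digit_indices)
--
--     # 2. Number of digits check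
--     if not (2 <= num_digits <= 3):
--         return False
--
--     # 3. Non-numerical character between each number
--     # This condition only applies if there are 2 or 3 digits.
--     # The previous check already ensures num_digits is 2 or 3.
--
--     for i in range(len(digit_indices) - 1):
--         idx_digit1 = digit_indices[i]
--         idx_digit2 = digit_indices[i+1]
--
--         # Substring between the current digit and the next one
--         substring_between = s[idx_digit1 + 1 : idx_digit2]
--
--         # There must be at least one character between them
--         if not substring_between:
--             return False
--
--         # That character (or one of them) must be non-numerical
--         has_non_digit = False
--         for char_between in substring_between:
--             if not char_between.isdigit():
--                 has_non_digit = True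
--                 break
--
--         if not has_non_digit:
--             return False
--
--     return True
-- ===== SOURCE B (Python) =====
-- def validate_string_test1(s: str) -> bool:
--     count = 0
--     prev = -2
--     for i, ch in enumerate(s):
--         if ch.isdigit():
--             if i == prev + 1:
--                 return False
--             count += 1
--             prev = i
--     return len(s) >= 6 and 2 <= count <= 3
-- ===== Notes on version B (the rewrite author's own statement) =====
-- stated objective: simpler
-- what changed: B replaces A's three-phase check (build a digit-index list, then slice out each substring between consecutive digit indices and scan it for a non-digit) by a single enumerate pass that keeps a digit count and the previous digit's index, rejecting immediately on adjacent digit positions; this works because every character strictly between two consecutive digit positions is by definition a non-digit, so A's substring check reduces to an adjacency test.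
import Mathlib
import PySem

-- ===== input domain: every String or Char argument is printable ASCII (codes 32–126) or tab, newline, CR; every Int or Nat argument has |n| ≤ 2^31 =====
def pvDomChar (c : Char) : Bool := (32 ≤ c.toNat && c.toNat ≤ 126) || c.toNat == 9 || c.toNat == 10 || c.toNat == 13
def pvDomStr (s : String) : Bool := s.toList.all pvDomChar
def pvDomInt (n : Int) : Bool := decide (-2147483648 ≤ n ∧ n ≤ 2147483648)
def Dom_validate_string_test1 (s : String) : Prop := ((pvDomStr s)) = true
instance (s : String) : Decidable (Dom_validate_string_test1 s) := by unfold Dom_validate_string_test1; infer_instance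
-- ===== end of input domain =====

-- B replaces A's index-list + substring-slice checks by one enumerate pass keeping a digit count
-- and the previous digit's index (adjacency test); objective: simpler, same return value everywhere.

-- ===== PORT A =====
-- inner 'for char_between in substring_between: … break' loop of A
def pvHasNonDigit : List Char → Bool
  | [] => false
  | c :: rest => if !(PySem.Chars.isdigit c) then true else pvHasNonDigit rest

-- the 'for i in range(len(digit_indices) - 1)' loop of A, with early return
def pvALoop (l : List Char) (idxs : List Int) : List Int → Bool
  | [] => true
  | i :: rest =>
      let a := PySem.List.pyGetD idxs i 0
      let b := PySem.List.pyGetD idxs (i + 1) 0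
      let sub := PySem.List.slice l (some (a + 1)) (some b)
      if sub = [] then false
      else if !(pvHasNonDigit sub) then false
      else pvALoop l idxs rest

def validate_string_test1 (s : String) : Bool :=
  if PySem.Str.len s < 6 then false
  else
    let digit_indices :=
      (PySem.List.enumerate s.toList).foldl
        (fun acc p => if PySem.Chars.isdigit p.2 then acc ++ [p.1] else acc) []
    let num_digits : Int := digit_indices.length
    if !(2 ≤ num_digits ∧ num_digits ≤ 3 : Bool) then false
    else pvALoop s.toList digit_indices (PySem.List.pyRange 0 (num_digits - 1) 1)

-- ===== PORT B =====
-- B's single enumerate pass: counts digits, early False on adjacent digit indices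
def pvBLoop (count prev : Int) : List (Int × Char) → Option Int
  | [] => some count
  | (i, c) :: rest =>
      if PySem.Chars.isdigit c then
        if i = prev + 1 then none
        else pvBLoop (count + 1) i rest
      else pvBLoop count prev rest

def validate_string_test1_alt (s : String) : Bool :=
  match pvBLoop 0 (-2) (PySem.List.enumerate s.toList) with
  | none => false
  | some count => decide (6 ≤ PySem.Str.len s) && decide (2 ≤ count ∧ count ≤ 3)

-- ===== PRECONDITION & SPEC =====
def Spec_validate_string_test1 (s : String) (out : Bool) : Prop := out = validate_string_test1_alt s
instance (s : String) (out : Bool) : Decidable (Spec_validate_string_test1 s out) := by unfold Spec_validate_string_test1; infer_instance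

-- ===== CLAIM (what is proved, stated in full; the proofs are below) =====
def Claim_equal_validate_string_test1 : Prop := ∀ (s : String), Dom_validate_string_test1 s → Spec_validate_string_test1 s (validate_string_test1 s)

-- ===== LEMMAS AND PROOFS =====

-- the digit-index list A builds (enumerate start s0, generalized for induction)
def pvDs (s0 : Int) (l : List Char) : List Int :=
  ((PySem.List.enumerate l s0).filter (fun p => PySem.Chars.isdigit p.2)).map (·.1)

-- B's adjacency chain check, abstracted from pvBLoop
def pvChain (p : Int) : List Int → Bool
  | [] => true
  | a :: r => (a ≠ p + 1 : Bool) && pvChain a r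

theorem pvDs_nil (s0 : Int) : pvDs s0 [] = [] := by
  simp [pvDs, PySem.List.enumerate_nil]

theorem pvDs_cons (s0 : Int) (c : Char) (l : List Char) :
    pvDs s0 (c :: l) =
      if PySem.Chars.isdigit c then s0 :: pvDs (s0 + 1) l else pvDs (s0 + 1) l := by
  by_cases hd : PySem.Chars.isdigit c <;>
    simp [pvDs, PySem.List.enumerate_cons, hd]

theorem pvBLoop_eq (l : List Char) : ∀ (s0 count prev : Int),
    pvBLoop count prev (PySem.List.enumerate l s0) =
      if pvChain prev (pvDs s0 l) then some (count + (pvDs s0 l).length) else none := by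
  induction l with
  | nil => intro s0 count prev; simp [pvDs_nil, PySem.List.enumerate_nil, pvBLoop, pvChain]
  | cons c l ih =>
      intro s0 count prev
      rw [PySem.List.enumerate_cons, pvDs_cons]
      by_cases hd : PySem.Chars.isdigit c
      · by_cases ha : s0 = prev + 1
        · simp [pvBLoop, hd, ha, pvChain]
        · simp [pvBLoop, hd, ha, pvChain, ih (s0+1)]
          split_ifs <;> simp
          omega
      · simp [pvBLoop, hd, ih (s0 + 1)]
  
theorem pvDs_mem_ge (l : List Char) : ∀ (s0 a : Int), a ∈ pvDs s0 l → s0 ≤ a := by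
  induction l with
  | nil => intro s0 a h; simp [pvDs_nil] at h
  | cons c l ih =>
      intro s0 a h
      rw [pvDs_cons] at h
      split_ifs at h with hd
      · rcases List.mem_cons.1 h with rfl | h
        · exact le_refl a
        · have := ih (s0+1) a h; omega
      · have := ih (s0+1) a h; omega

-- membership characterization of pvDs 0 l
theorem pvDs_mem (l : List Char) (a : Int) :
    a ∈ pvDs 0 l ↔ ∃ (k : Nat) (h : k < l.length), a = (k : Int) ∧ PySem.Chars.isdigit l[k] := by
  simp only [pvDs, List.mem_map, List.mem_filter]
  constructor
  · rintro ⟨p, ⟨hp, hdig⟩, rfl⟩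
    rcases (PySem.List.mem_enumerate_iff l 0 p).1 hp with ⟨k, hk, rfl⟩
    exact ⟨k, hk, by simp, by simpa using hdig⟩
  · rintro ⟨k, hk, rfl, hdig⟩
    exact ⟨((k : Int), l[k]), ⟨(PySem.List.mem_enumerate_iff l 0 _).2 ⟨k, hk, by simp⟩, hdig⟩, rfl⟩

theorem pvDs_sorted (l : List Char) (s0 : Int) : (pvDs s0 l).Pairwise (· < ·) := by
  exact ((PySem.List.pairwise_lt_enumerate l s0).filter _).map _ (fun _ _ h => h)

theorem pvHasNonDigit_any (cs : List Char) :
    pvHasNonDigit cs = cs.any (fun c => !(PySem.Chars.isdigit c)) := by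
  induction cs with
  | nil => rfl
  | cons c cs ih =>
      by_cases h : PySem.Chars.isdigit c <;> simp [pvHasNonDigit, h, ih]

-- A's range loop is an 'all' over the range list
theorem pvALoop_all (l : List Char) (idxs : List Int) (r : List Int) :
    pvALoop l idxs r = r.all (fun i =>
      let sub := PySem.List.slice l (some (PySem.List.pyGetD idxs i 0 + 1))
                                   (some (PySem.List.pyGetD idxs (i + 1) 0))
      (sub ≠ [] : Bool) && pvHasNonDigit sub) := by
  induction r with
  | nil => rfl
  | cons i r ih =>
      simp only [pvALoop, List.all_cons, ih]
      split_ifs with h1 h2 <;> simp_all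

-- pvChain as an indexed condition (first element unconstrained when prev < every element - 1 fails never; general)
theorem pvChain_idx (ds : List Int) : ∀ (p : Int),
    pvChain p ds = true ↔
      ((∀ h0 : 0 < ds.length, ds[0] ≠ p + 1) ∧
       ∀ (k : Nat) (h : k + 1 < ds.length), ds[k + 1] ≠ ds[k] + 1) := by
  induction ds with
  | nil => intro p; simp [pvChain]
  | cons a r ih =>
      intro p
      simp only [pvChain, Bool.and_eq_true, decide_eq_true_eq, ih a]
      constructor
      · rintro ⟨h1, h2, h3⟩
        refine ⟨fun _ => by simpa using h1, ?_⟩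
        rintro (_ | k) hk
        · simpa using h2 (by simpa using hk)
        · simpa using h3 k (by simpa using hk)
      · rintro ⟨h1, h2⟩
        refine ⟨by simpa using h1 (by simp), fun h0 => ?_, fun k hk => ?_⟩
        · simpa using h2 0 (by simpa using h0)
        · simpa using h2 (k + 1) (by simpa using hk)

-- key fact: between consecutive digit positions of l there is no digit, and positions are in range
theorem pvDs_consecutive (l : List Char) (k : Nat) (hk : k + 1 < (pvDs 0 l).length) :
    ∃ (a b : Nat), (pvDs 0 l)[k] = (a : Int) ∧ (pvDs 0 l)[k + 1] = (b : Int) ∧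
      a < b ∧ b < l.length ∧
      ∀ (j : Nat) (hj : j < l.length), a < j → j < b → ¬ (PySem.Chars.isdigit l[j] = true) := by
  have hs := (pvDs_sorted l 0)
  have hmemk : (pvDs 0 l)[k] ∈ pvDs 0 l := List.getElem_mem (by omega)
  have hmemk1 : (pvDs 0 l)[k + 1] ∈ pvDs 0 l := List.getElem_mem hk
  rcases (pvDs_mem l _).1 hmemk with ⟨a, _, hak, _⟩
  rcases (pvDs_mem l _).1 hmemk1 with ⟨b, hb, hbk, _⟩
  have hlt : (pvDs 0 l)[k] < (pvDs 0 l)[k + 1] :=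
    List.pairwise_iff_getElem.1 hs k (k + 1) (by omega) hk (by omega)
  refine ⟨a, b, hak, hbk, by omega, hb, ?_⟩
  intro j hj hj1 hj2 hdj
  have hjm : (j : Int) ∈ pvDs 0 l := (pvDs_mem l _).2 ⟨j, hj, rfl, hdj⟩
  rcases List.mem_iff_getElem.1 hjm with ⟨m, hm, hmj⟩
  have hcmp := List.pairwise_iff_getElem.1 hs
  by_cases hmk : m ≤ k
  · rcases Nat.lt_or_ge m k with h | h
    · have := hcmp m k hm (by omega) h
      rw [hmj, hak] at this; omega
    · have : m = k := by omega
      subst this; rw [hmj] at hak; omega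
  · have hge : k + 1 ≤ m := by omega
    rcases Nat.lt_or_ge (k+1) m with h | h
    · have := hcmp (k+1) m hk hm h
      rw [hmj, hbk] at this; omega
    · have : m = k + 1 := by omega
      subst this; rw [hmj] at hbk; omega

-- the pair check of A equals the adjacency check on consecutive digit positions
theorem pvPair_eq (l : List Char) (k : Nat) (hk : k + 1 < (pvDs 0 l).length) :
    (decide (PySem.List.slice l (some ((pvDs 0 l)[k] + 1)) (some ((pvDs 0 l)[k + 1])) ≠ []) &&
      pvHasNonDigit (PySem.List.slice l (some ((pvDs 0 l)[k] + 1)) (some ((pvDs 0 l)[k + 1])))) =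
      ((pvDs 0 l)[k + 1] ≠ (pvDs 0 l)[k] + 1 : Bool) := by
  rcases pvDs_consecutive l k hk with ⟨a, b, hak, hbk, hab, hbl, hnd⟩
  simp only [hak, hbk]
  have hcast : ((a : Int) + 1) = ((a + 1 : Nat) : Int) := by push_cast; ring
  rw [hcast, PySem.List.slice_natCast]
  by_cases hadj : b = a + 1
  · subst hadj; simp
  · have hlen : (List.take (b - (a + 1)) (List.drop (a + 1) l)).length = b - (a + 1) := by
      simp [List.length_take, List.length_drop]; omega
    have hne : List.take (b - (a + 1)) (List.drop (a + 1) l) ≠ [] := by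
      intro h; rw [h] at hlen; simp at hlen; omega
    have h0 : (List.take (b - (a + 1)) (List.drop (a + 1) l))[0]'(by rw [hlen]; omega) = l[a + 1]'(by omega) := by
      simp
    have hmem : l[a + 1]'(by omega) ∈ List.take (b - (a + 1)) (List.drop (a + 1) l) := by
      rw [← h0]; exact List.getElem_mem _
    have hnd1 : ¬ (PySem.Chars.isdigit (l[a + 1]'(by omega)) = true) :=
      hnd (a + 1) (by omega) (by omega) (by omega)
    have hany : pvHasNonDigit (List.take (b - (a + 1)) (List.drop (a + 1) l)) = true := by
      rw [pvHasNonDigit_any, List.any_eq_true]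
      exact ⟨_, hmem, by simp [hnd1]⟩
    have hbne : ((b : Int) ≠ (a : Int) + 1) := by omega
    simp [hne, hany, hbne]

theorem pvPair_true_iff (l : List Char) (k : Nat) (hk : k + 1 < (pvDs 0 l).length) :
    (decide (PySem.List.slice l (some ((pvDs 0 l)[k] + 1)) (some ((pvDs 0 l)[k + 1])) ≠ []) &&
      pvHasNonDigit (PySem.List.slice l (some ((pvDs 0 l)[k] + 1)) (some ((pvDs 0 l)[k + 1])))) = true
      ↔ (pvDs 0 l)[k + 1] ≠ (pvDs 0 l)[k] + 1 := by
  rw [pvPair_eq l k hk]; simp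

theorem main_eq (l : List Char) :
    pvALoop l (pvDs 0 l) (PySem.List.pyRange 0 ((pvDs 0 l).length - 1) 1) =
      pvChain (-2) (pvDs 0 l) := by
  rw [Bool.eq_iff_iff, pvALoop_all, List.all_eq_true, pvChain_idx]
  have hge : ∀ a ∈ pvDs 0 l, (0 : Int) ≤ a := fun a h => pvDs_mem_ge l 0 a h
  constructor
  · intro h
    refine ⟨fun h0 => ?_, fun k hk1 => ?_⟩
    · have := hge _ (List.getElem_mem h0); omega
    · have hk : (k : Int) ∈ PySem.List.pyRange 0 ((pvDs 0 l).length - 1) 1 := by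
        rw [PySem.List.mem_pyRange_one]; constructor <;> omega
      have := h _ hk
      rw [PySem.List.pyGetD_eq_getElem _ 0 (by omega) (by omega)] at this
      have hcast : ((k : Int) + 1) = ((k + 1 : Nat) : Int) := by push_cast; ring
      rw [hcast, PySem.List.pyGetD_eq_getElem _ 0 (by omega) (by push_cast; omega)] at this
      simp only [Int.toNat_natCast] at this
      exact (pvPair_true_iff l k hk1).1 this
  · rintro ⟨h0, hpair⟩ i hi
    rw [PySem.List.mem_pyRange_one] at hi
    obtain ⟨hi0, hi1⟩ := hi
    have hk1 : i.toNat + 1 < (pvDs 0 l).length := by omega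
    rw [PySem.List.pyGetD_eq_getElem _ 0 (by omega) (by omega)]
    have hcast : (i + 1) = ((i.toNat + 1 : Nat) : Int) := by push_cast; omega
    rw [hcast, PySem.List.pyGetD_eq_getElem _ 0 (by omega) (by push_cast; omega)]
    simp only [Int.toNat_natCast]
    exact (pvPair_true_iff l i.toNat hk1).2 (hpair i.toNat hk1)

-- A's foldl builds pvDs 0
theorem pvFold_eq (l : List Char) :
    (PySem.List.enumerate l).foldl
        (fun acc p => if PySem.Chars.isdigit p.2 then acc ++ [p.1] else acc) []
      = pvDs 0 l := by
  simpa [pvDs] using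
    PySem.List.foldl_append_if (fun p : Int × Char => PySem.Chars.isdigit p.2) (·.1)
      (PySem.List.enumerate l) []

-- ===== VERDICT (by name: the statement is the Claim_ definition above) =====
theorem validate_string_test1_spec : Claim_equal_validate_string_test1 := by
  intro s _
  unfold Spec_validate_string_test1 validate_string_test1 validate_string_test1_alt
  simp only [pvFold_eq, PySem.Str.len_eq]
  rw [pvBLoop_eq s.toList 0 0 (-2), main_eq]
  set ds := pvDs 0 s.toList with hds
  by_cases hc : pvChain (-2) ds = true
  · simp only [hc, if_true]
    rw [Bool.eq_iff_iff]
    simp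
    omega
  · simp only [hc, Bool.false_eq_true, if_false]
    split_ifs <;> simp
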